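-- pv_equiv track=rewrite | github.com/shivaditya-meduri/adventOfCode | AOC24_day22.py | gen_sec
-- ===== SOURCE A (Python) =====
-- def gen_sec(cur_sec, iterations):
--     for _ in range(iterations):
--         res = cur_sec * 64
--         mix_res = cur_sec ^ res
--         pru_res = mix_res%16777216
--         cur_sec = pru_res
--         res = cur_sec//32
--         mix_res = cur_sec ^ res
--         pru_res = mix_res%16777216
--         cur_sec = pru_res
--         res = cur_sec*2048
--         mix_res = cur_sec ^ res
--         pru_res = mix_res%16777216
--         cur_sec = pru_res
--     return cur_sec
-- ===== SOURCE B (Python) =====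
-- def gen_sec(cur_sec, iterations):
--     # GF(2)-linear view of the AoC day-22 step: each round is a linear map on the
--     # 24-bit state, so compose it via binary matrix exponentiation (24 columns).
--     if iterations <= 0:
--         return cur_sec
--     MASK = 16777215
--
--     def step(x):
--         x = (x ^ (x << 6)) & MASK
--         x = x ^ (x >> 5)
--         return (x ^ (x << 11)) & MASK
--
--     def apply(mat, x):
--         r = 0
--         for c in mat:
--             if x & 1:
--                 r ^= c
--             x >>= 1
--         return r
--
--     def matmul(m2, m1):
--         return [apply(m2, c) for c in m1]
--
--     base = [step(1 << i) for i in range(24)]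
--     result = [1 << i for i in range(24)]
--     n = iterations
--     while n:
--         if n & 1:
--             result = matmul(base, result)
--         base = matmul(base, base)
--         n >>= 1
--     return apply(result, cur_sec % 16777216)
-- ===== Notes on version B (the rewrite author's own statement) =====
-- stated objective: faster
-- what changed: A applies the three mix/prune rounds once per iteration (O(iterations) rounds); B exploits that one round is a GF(2)-linear map on the 24-bit state and composes it by binary exponentiation of a 24-column bit matrix, needing only O(log iterations) matrix products.
import Mathlib
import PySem

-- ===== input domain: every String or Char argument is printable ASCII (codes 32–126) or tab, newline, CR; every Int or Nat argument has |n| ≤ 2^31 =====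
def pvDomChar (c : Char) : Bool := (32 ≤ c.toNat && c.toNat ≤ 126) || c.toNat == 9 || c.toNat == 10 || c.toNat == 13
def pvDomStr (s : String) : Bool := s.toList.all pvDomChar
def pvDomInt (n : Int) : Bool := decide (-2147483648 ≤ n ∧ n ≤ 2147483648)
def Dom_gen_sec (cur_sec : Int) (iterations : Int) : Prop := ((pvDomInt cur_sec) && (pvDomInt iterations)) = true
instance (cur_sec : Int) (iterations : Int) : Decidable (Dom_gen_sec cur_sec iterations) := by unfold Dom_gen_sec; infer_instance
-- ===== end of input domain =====

-- B replaces A's per-round loop by GF(2) matrix exponentiation of the linear round map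
-- (logarithmically many matrix products instead of one pass per round); return values agree on all inputs.

-- ===== PORT A =====
-- the loop body of A: three mix/prune rounds, transliterated statement by statement
def pvStepA (cur_sec : Int) : Int :=
  let res := cur_sec * 64
  let mix_res := PySem.Int.bxor cur_sec res
  let pru_res := PySem.Int.mod mix_res 16777216
  let cur1 := pru_res
  let res2 := PySem.Int.floordiv cur1 32
  let mix2 := PySem.Int.bxor cur1 res2
  let pru2 := PySem.Int.mod mix2 16777216
  let cur2 := pru2
  let res3 := cur2 * 2048
  let mix3 := PySem.Int.bxor cur2 res3
  PySem.Int.mod mix3 16777216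

def gen_sec (cur_sec : Int) (iterations : Int) : Int :=
  (PySem.List.pyRange 0 iterations 1).foldl (fun s _ => pvStepA s) cur_sec

-- ===== PORT B =====
-- Source B's step(x): the round map on the 24-bit state, in shift/mask form
def pvStepB (x : Nat) : Nat :=
  let x1 := (x ^^^ (x <<< 6)) &&& 16777215
  let x2 := x1 ^^^ (x1 >>> 5)
  (x2 ^^^ (x2 <<< 11)) &&& 16777215

-- Source B's apply(mat, x): r = 0; for c in mat: if x & 1: r ^= c; x >>= 1
def pvApply (mat : List Nat) (x : Nat) : Nat :=
  (mat.foldl (fun (p : Nat × Nat) c =>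
      (if p.2 &&& 1 = 1 then p.1 ^^^ c else p.1, p.2 >>> 1)) (0, x)).1

-- Source B's matmul(m2, m1)
def pvMatmul (m2 m1 : List Nat) : List Nat := m1.map (fun c => pvApply m2 c)

-- Source B's while-loop: binary exponentiation of the column matrix
def pvPow (base result : List Nat) (n : Nat) : List Nat :=
  if h0 : n = 0 then result
  else pvPow (pvMatmul base base)
             (if n &&& 1 = 1 then pvMatmul base result else result) (n >>> 1)
  termination_by n
  decreasing_by
    simpa [Nat.shiftRight_one] using Nat.div_lt_self (Nat.pos_of_ne_zero h0) one_lt_two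

-- Source B's base = [step(1 << i) for i in range(24)] and the identity matrix
def pvBase : List Nat := (List.range 24).map (fun i => pvStepB (1 <<< i))
def pvIdent : List Nat := (List.range 24).map (fun i => 1 <<< i)

def gen_sec_alt (cur_sec : Int) (iterations : Int) : Int :=
  if iterations ≤ 0 then cur_sec
  else ((pvApply (pvPow pvBase pvIdent iterations.toNat)
          ((PySem.Int.mod cur_sec 16777216).toNat) : Nat) : Int)

-- ===== PRECONDITION & SPEC =====
def Spec_gen_sec (cur_sec : Int) (iterations : Int) (out : Int) : Prop := out = gen_sec_alt cur_sec iterations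
instance (cur_sec : Int) (iterations : Int) (out : Int) : Decidable (Spec_gen_sec cur_sec iterations out) := by unfold Spec_gen_sec; infer_instance

-- ===== CLAIM (what is proved, stated in full; the proofs are below) =====
def Claim_equal_gen_sec : Prop := ∀ (cur_sec : Int) (iterations : Int), Dom_gen_sec cur_sec iterations → Spec_gen_sec cur_sec iterations (gen_sec cur_sec iterations)

-- ===== LEMMAS AND PROOFS =====

-- Nat bitwise toolbox ---------------------------------------------------------

lemma pvXorLeftComm (p q r : Nat) : p ^^^ (q ^^^ r) = q ^^^ (p ^^^ r) := by
  rw [← Nat.xor_assoc, Nat.xor_comm p q, Nat.xor_assoc]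

lemma pvXor4 (a b c d : Nat) : (a ^^^ b) ^^^ (c ^^^ d) = (a ^^^ c) ^^^ (b ^^^ d) := by
  rw [Nat.xor_assoc, Nat.xor_assoc, pvXorLeftComm b c d]

lemma pvAddXor (a : Nat) : ∀ b : Nat, a &&& b = 0 → a + b = a ^^^ b := by
  induction a using Nat.strong_induction_on with
  | _ a ih =>
    intro b h
    rcases Nat.eq_zero_or_pos a with ha | hpos
    · simp [ha]
    · have h2 : a / 2 &&& b / 2 = 0 := by
        have h' : (a &&& b) >>> 1 = 0 := by rw [h]; rfl
        rwa [Nat.shiftRight_and_distrib, Nat.shiftRight_one, Nat.shiftRight_one] at h'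
      have hpar : ¬ (a % 2 = 1 ∧ b % 2 = 1) := by
        intro ⟨h1, h2'⟩
        have := congrArg (fun t => t.testBit 0) h
        simp [Nat.testBit_zero, h1, h2'] at this
      have hxd : (a ^^^ b) / 2 = a / 2 ^^^ b / 2 := by
        have := @Nat.shiftRight_xor_distrib 1 a b
        simpa [Nat.shiftRight_one] using this
      have hxm : (a ^^^ b) % 2 = (a + b) % 2 := Nat.xor_mod_two_eq
      have hih := ih (a / 2) (Nat.div_lt_self hpos one_lt_two) (b / 2) h2
      omega

lemma pvAndMask (x : Nat) : x &&& 16777215 = x % 16777216 := by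
  have := Nat.and_two_pow_sub_one_eq_mod x 24
  norm_num at this
  exact this

lemma pvMaskLt (x : Nat) : x &&& 16777215 < 16777216 := by
  rw [pvAndMask]; omega

lemma pvXorModPow (a b : Nat) : (a ^^^ b) % 16777216 = a % 16777216 ^^^ b % 16777216 := by
  have := @Nat.xor_mod_two_pow a b 24
  norm_num at this
  exact this

lemma pvXorMask (x : Nat) (hx : x < 16777216) : x ^^^ 16777215 = 16777215 - x := by
  have hand : x &&& (x ^^^ 16777215) = 0 := by
    rw [Nat.and_xor_distrib_left, Nat.and_self, pvAndMask, Nat.mod_eq_of_lt hx,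
      Nat.xor_self]
  have hadd : x + (x ^^^ 16777215) = 16777215 := by
    rw [pvAddXor x _ hand, ← Nat.xor_assoc, Nat.xor_self, Nat.zero_xor]
  omega

lemma pvXorLt (a b : Nat) (ha : a < 16777216) (hb : b < 16777216) :
    a ^^^ b < 16777216 := by
  have h : (a ^^^ b) % 16777216 = a ^^^ b := by
    rw [pvXorModPow, Nat.mod_eq_of_lt ha, Nat.mod_eq_of_lt hb]
  omega

-- Int residue bridge ----------------------------------------------------------

def pvNr (a : Int) : Nat := (a % 16777216).toNat

lemma pvNr_lt (a : Int) : pvNr a < 16777216 := by unfold pvNr; omega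

lemma pvNr_small (k : Nat) (hk : k < 16777216) : pvNr (k : Int) = k := by
  unfold pvNr; omega

lemma pvNegEmod (k : Nat) : (-(k : Int) - 1) % 16777216 = ((16777215 - k % 16777216 : Nat) : Int) := by
  omega

lemma pvBxorEmod (a b : Int) :
    PySem.Int.bxor a b % 16777216 = ((pvNr a ^^^ pvNr b : Nat) : Int) := by
  unfold PySem.Int.bxor
  split_ifs with ha hb hb
  · -- a ≥ 0, b ≥ 0
    have h1 : ((a.toNat ^^^ b.toNat : Nat) : Int) % 16777216
        = (((a.toNat ^^^ b.toNat) % 16777216 : Nat) : Int) := by omega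
    have h2 : pvNr a = a.toNat % 16777216 := by unfold pvNr; omega
    have h3 : pvNr b = b.toNat % 16777216 := by unfold pvNr; omega
    rw [h1, h2, h3, pvXorModPow]
  · -- a ≥ 0, b < 0
    set m := (-b - 1).toNat with hm
    have h1 : (-(((a.toNat ^^^ m : Nat) : Int)) - 1) % 16777216
        = ((16777215 - (a.toNat ^^^ m) % 16777216 : Nat) : Int) := pvNegEmod _
    have h2 : pvNr a = a.toNat % 16777216 := by unfold pvNr; omega
    have h3 : pvNr b = 16777215 - m % 16777216 := by unfold pvNr; omega
    rw [h1, h2, h3]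
    congr 1
    rw [pvXorModPow, ← pvXorMask (m % 16777216) (by omega),
        ← pvXorMask ((a.toNat % 16777216) ^^^ (m % 16777216))
          (pvXorLt _ _ (by omega) (by omega))]
    simp [Nat.xor_comm, pvXorLeftComm]
  · -- a < 0, b ≥ 0
    set m := (-a - 1).toNat with hm
    have h1 : (-(((m ^^^ b.toNat : Nat) : Int)) - 1) % 16777216
        = ((16777215 - (m ^^^ b.toNat) % 16777216 : Nat) : Int) := pvNegEmod _
    have h2 : pvNr a = 16777215 - m % 16777216 := by unfold pvNr; omega
    have h3 : pvNr b = b.toNat % 16777216 := by unfold pvNr; omega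
    rw [h1, h2, h3]
    congr 1
    rw [pvXorModPow, ← pvXorMask (m % 16777216) (by omega),
        ← pvXorMask ((m % 16777216) ^^^ (b.toNat % 16777216))
          (pvXorLt _ _ (by omega) (by omega))]
    simp [Nat.xor_comm, pvXorLeftComm]
  · -- a < 0, b < 0
    set ma := (-a - 1).toNat with hma
    set mb := (-b - 1).toNat with hmb
    have h1 : ((ma ^^^ mb : Nat) : Int) % 16777216
        = (((ma ^^^ mb) % 16777216 : Nat) : Int) := by omega
    have h2 : pvNr a = 16777215 - ma % 16777216 := by unfold pvNr; omega
    have h3 : pvNr b = 16777215 - mb % 16777216 := by unfold pvNr; omega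
    rw [h1, h2, h3]
    congr 1
    rw [pvXorModPow, ← pvXorMask (ma % 16777216) (by omega),
        ← pvXorMask (mb % 16777216) (by omega), pvXor4, Nat.xor_self, Nat.xor_zero]

-- the three mix/prune stages of one round, bridged to Nat shift/mask form -------

lemma pvStage1 (x : Int) :
    PySem.Int.mod (PySem.Int.bxor x (x * 64)) 16777216
      = (((pvNr x ^^^ (pvNr x <<< 6)) &&& 16777215 : Nat) : Int) := by
  have hnr64 : pvNr (x * 64) = (pvNr x <<< 6) % 16777216 := by
    rw [Nat.shiftLeft_eq, show (2:Nat)^6 = 64 from by norm_num]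
    unfold pvNr
    omega
  rw [PySem.Int.mod_eq_emod_of_pos (by norm_num), pvBxorEmod, hnr64]
  congr 1
  rw [pvAndMask, pvXorModPow, Nat.mod_eq_of_lt (pvNr_lt x)]

lemma pvStage2 (n1 : Nat) (hn1 : n1 < 16777216) :
    PySem.Int.mod (PySem.Int.bxor (n1 : Int) (PySem.Int.floordiv (n1 : Int) 32)) 16777216
      = ((n1 ^^^ (n1 >>> 5) : Nat) : Int) := by
  have hfd : PySem.Int.floordiv (n1 : Int) 32 = ((n1 / 32 : Nat) : Int) := by
    exact_mod_cast PySem.Int.floordiv_natCast n1 32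
  rw [hfd, PySem.Int.bxor_natCast, PySem.Int.mod_eq_emod_of_pos (by norm_num),
      Nat.shiftRight_eq_div_pow, show (2:Nat)^5 = 32 from by norm_num]
  have hlt : n1 ^^^ n1 / 32 < 16777216 := pvXorLt _ _ hn1 (by omega)
  rw [Int.emod_eq_of_lt (by exact_mod_cast Nat.zero_le _) (by exact_mod_cast hlt)]

lemma pvStage3 (n2 : Nat) :
    PySem.Int.mod (PySem.Int.bxor (n2 : Int) ((n2 : Int) * 2048)) 16777216
      = (((n2 ^^^ (n2 <<< 11)) &&& 16777215 : Nat) : Int) := by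
  have hc : ((n2 : Int) * 2048) = ((n2 * 2048 : Nat) : Int) := by push_cast; ring
  rw [hc, PySem.Int.bxor_natCast, PySem.Int.mod_eq_emod_of_pos (by norm_num),
      pvAndMask, Nat.shiftLeft_eq, show (2:Nat)^11 = 2048 from by norm_num]
  omega

-- the single-round bridge: A's loop body equals B's step on the 24-bit residue --

lemma pvStepBridge (x : Int) : pvStepA x = ((pvStepB (pvNr x) : Nat) : Int) := by
  simp only [pvStepA, pvStepB]
  rw [pvStage1, pvStage2 _ (pvMaskLt _), pvStage3]

lemma pvStepB_lt (y : Nat) : pvStepB y < 16777216 := by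
  unfold pvStepB
  exact pvMaskLt _

-- A as an iterate of the round map -------------------------------------------

lemma pvFoldConst {α β : Type} (l : List α) (f : β → β) (init : β) :
    l.foldl (fun s _ => f s) init = f^[l.length] init := by
  induction l generalizing init with
  | nil => rfl
  | cons a t ih => simp [List.foldl_cons, ih, Function.iterate_succ_apply]

lemma pvLiftIter (k : Nat) : ∀ x : Int,
    pvStepA^[k + 1] x = ((pvStepB^[k + 1] (pvNr x) : Nat) : Int) := by
  induction k with
  | zero => intro x; simpa using pvStepBridge x
  | succ k ih =>
    intro x
    rw [Function.iterate_succ_apply pvStepA, pvStepBridge x,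
        ih ((pvStepB (pvNr x) : Nat) : Int),
        pvNr_small _ (pvStepB_lt _), ← Function.iterate_succ_apply pvStepB]

-- B's apply: structure, linearity, composition --------------------------------

lemma pvApply_nil (x : Nat) : pvApply [] x = 0 := rfl

lemma pvApplyAux (mat : List Nat) : ∀ r x : Nat,
    (mat.foldl (fun (p : Nat × Nat) c =>
      (if p.2 &&& 1 = 1 then p.1 ^^^ c else p.1, p.2 >>> 1)) (r, x)).1
    = r ^^^ (mat.foldl (fun (p : Nat × Nat) c =>
      (if p.2 &&& 1 = 1 then p.1 ^^^ c else p.1, p.2 >>> 1)) (0, x)).1 := by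
  induction mat with
  | nil => intro r x; simp
  | cons c t ih =>
    intro r x
    simp only [List.foldl_cons]
    by_cases h : x &&& 1 = 1
    · simp only [if_pos h, Nat.zero_xor]
      rw [ih (r ^^^ c), ih c, Nat.xor_assoc]
    · simp only [if_neg h]
      exact ih r (x >>> 1)

lemma pvApply_cons (c : Nat) (rest : List Nat) (x : Nat) :
    pvApply (c :: rest) x
      = (if x &&& 1 = 1 then c else 0) ^^^ pvApply rest (x >>> 1) := by
  unfold pvApply
  simp only [List.foldl_cons]
  by_cases h : x &&& 1 = 1
  · simp only [if_pos h, Nat.zero_xor]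
    exact pvApplyAux rest c (x >>> 1)
  · simp only [if_neg h, Nat.zero_xor]

lemma pvApply_zero (mat : List Nat) : pvApply mat 0 = 0 := by
  induction mat with
  | nil => rfl
  | cons c t ih => rw [pvApply_cons]; simp [ih]

lemma pvXorXorCancel (c A B : Nat) : (c ^^^ A) ^^^ (c ^^^ B) = A ^^^ B := by
  rw [pvXor4, Nat.xor_self, Nat.zero_xor]

lemma pvApply_linear (mat : List Nat) : ∀ a b : Nat,
    pvApply mat (a ^^^ b) = pvApply mat a ^^^ pvApply mat b := by
  induction mat with
  | nil => intro a b; simp [pvApply_nil]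
  | cons c t ih =>
    intro a b
    rw [pvApply_cons, pvApply_cons, pvApply_cons,
        Nat.shiftRight_xor_distrib, ih]
    have hab : (a ^^^ b) &&& 1 = (a &&& 1) ^^^ (b &&& 1) := Nat.and_xor_distrib_right
    have ha : a &&& 1 = a % 2 := Nat.and_one_is_mod a
    have hb : b &&& 1 = b % 2 := Nat.and_one_is_mod b
    by_cases h1 : a &&& 1 = 1 <;> by_cases h2 : b &&& 1 = 1
    · rw [if_neg (by rw [hab, h1, h2]; decide), if_pos h1, if_pos h2,
        Nat.zero_xor, pvXorXorCancel]
    · have hb0 : b &&& 1 = 0 := by rw [hb] at h2 ⊢; omega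
      rw [if_pos (by rw [hab, h1, hb0]; decide), if_pos h1, if_neg h2,
        Nat.zero_xor, Nat.xor_assoc]
    · have ha0 : a &&& 1 = 0 := by rw [ha] at h1 ⊢; omega
      rw [if_pos (by rw [hab, ha0, h2]; decide), if_neg h1, if_pos h2,
        Nat.zero_xor]
      exact pvXorLeftComm c _ _
    · have ha0 : a &&& 1 = 0 := by rw [ha] at h1 ⊢; omega
      have hb0 : b &&& 1 = 0 := by rw [hb] at h2 ⊢; omega
      rw [if_neg (by rw [hab, ha0, hb0]; decide), if_neg h1, if_neg h2]
      simp

lemma pvApply_map (m2 m1 : List Nat) : ∀ x : Nat,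
    pvApply (m1.map (fun c => pvApply m2 c)) x = pvApply m2 (pvApply m1 x) := by
  induction m1 with
  | nil => intro x; simp [pvApply_nil, pvApply_zero]
  | cons c t ih =>
    intro x
    rw [List.map_cons, pvApply_cons, pvApply_cons, ih, pvApply_linear]
    by_cases h : x &&& 1 = 1
    · rw [if_pos h, if_pos h]
    · rw [if_neg h, if_neg h, pvApply_zero]

-- a column matrix [f(2^i)] applies the linear map f ---------------------------

lemma pvApply_cols (n : Nat) : ∀ (f : Nat → Nat), f 0 = 0 →
    (∀ a b, f (a ^^^ b) = f a ^^^ f b) →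
    ∀ x, x < 2 ^ n →
    pvApply ((List.range n).map (fun i => f (1 <<< i))) x = f x := by
  induction n with
  | zero =>
    intro f h0 _ x hx
    interval_cases x
    simp [pvApply_nil, h0]
  | succ n ih =>
    intro f h0 hlin x hx
    rw [List.range_succ_eq_map, List.map_cons, List.map_map]
    rw [show ((fun i => f (1 <<< i)) ∘ Nat.succ)
          = (fun i => (fun y => f (2 * y)) (1 <<< i)) from by
        funext i; simp [Function.comp, Nat.shiftLeft_succ]]
    rw [pvApply_cons]
    have hg0 : (fun y => f (2 * y)) 0 = 0 := by simp [h0]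
    have hglin : ∀ a b, (fun y => f (2 * y)) (a ^^^ b)
        = (fun y => f (2 * y)) a ^^^ (fun y => f (2 * y)) b := by
      intro a b
      have h2 : 2 * (a ^^^ b) = (2 * a) ^^^ (2 * b) := by
        have := @Nat.shiftLeft_xor_distrib 1 a b
        simpa [Nat.shiftLeft_eq, Nat.mul_comm] using this
      simp only []
      rw [h2, hlin]
    have hx2 : x >>> 1 < 2 ^ n := by
      rw [Nat.shiftRight_one]
      rw [pow_succ] at hx
      omega
    rw [ih (fun y => f (2 * y)) hg0 hglin (x >>> 1) hx2]
    have hdisj : (x &&& 1) &&& (2 * (x >>> 1)) = 0 := by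
      rw [Nat.and_one_is_mod]
      rcases Nat.mod_two_eq_zero_or_one x with h | h
      · simp [h]
      · rw [h, Nat.and_comm, Nat.and_one_is_mod]
        omega
    have hdec : x = (x &&& 1) ^^^ 2 * (x >>> 1) := by
      rw [← pvAddXor _ _ hdisj, Nat.and_one_is_mod, Nat.shiftRight_one]
      omega
    conv_rhs => rw [hdec, hlin]
    rcases Nat.mod_two_eq_zero_or_one x with h | h <;>
      rw [Nat.and_one_is_mod, h]
    · rw [if_neg (by norm_num), h0, Nat.zero_xor]
    · rw [if_pos (by norm_num)]; rfl

-- binary exponentiation is function iteration ---------------------------------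

lemma pvIterSq {f g : Nat → Nat} (h : ∀ y, g y = f (f y)) :
    ∀ (k : Nat) (z : Nat), g^[k] z = f^[2 * k] z := by
  intro k
  induction k with
  | zero => intro z; rfl
  | succ k ih =>
    intro z
    rw [Function.iterate_succ_apply, h z, ih,
        show 2 * (k + 1) = 2 * k + 1 + 1 from by omega,
        Function.iterate_succ_apply, Function.iterate_succ_apply]

lemma pvPow_apply : ∀ (n : Nat) (base result : List Nat) (x : Nat),
    pvApply (pvPow base result n) x
      = (fun y => pvApply base y)^[n] (pvApply result x) := by
  intro n
  induction n using Nat.strong_induction_on with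
  | _ n ih =>
    intro base result x
    rw [pvPow]
    by_cases h : n = 0
    · simp [h]
    · simp only [h, dite_false]
      have hlt : n >>> 1 < n := by
        rw [Nat.shiftRight_one]
        exact Nat.div_lt_self (Nat.pos_of_ne_zero h) one_lt_two
      rw [ih (n >>> 1) hlt]
      have hsq : ∀ y, pvApply (pvMatmul base base) y
          = pvApply base (pvApply base y) := by
        intro y; unfold pvMatmul; exact pvApply_map base base y
      have hr : pvApply (if n &&& 1 = 1 then pvMatmul base result else result) x
          = (fun y => pvApply base y)^[n &&& 1] (pvApply result x) := by
        rcases Nat.mod_two_eq_zero_or_one n with hp | hp <;>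
          rw [Nat.and_one_is_mod, hp]
        · rfl
        · rw [if_pos rfl]
          unfold pvMatmul
          rw [pvApply_map]
          rfl
      rw [hr, pvIterSq hsq (n >>> 1),
          ← Function.iterate_add_apply,
          show 2 * (n >>> 1) + (n &&& 1) = n from by
            rw [Nat.shiftRight_one, Nat.and_one_is_mod]; omega]

-- iterate agreement and identity ----------------------------------------------

lemma pvIdentApply (x : Nat) (hx : x < 16777216) : pvApply pvIdent x = x := by
  unfold pvIdent
  exact pvApply_cols 24 (fun y => y) rfl (fun _ _ => rfl) x
    (lt_of_lt_of_le hx (by norm_num))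

lemma pvStage1Lin (a b : Nat) :
    ((a ^^^ b) ^^^ ((a ^^^ b) <<< 6)) &&& 16777215
      = ((a ^^^ (a <<< 6)) &&& 16777215) ^^^ ((b ^^^ (b <<< 6)) &&& 16777215) := by
  rw [Nat.shiftLeft_xor_distrib, pvXor4, Nat.and_xor_distrib_right]

lemma pvStage2Lin (a b : Nat) :
    (a ^^^ b) ^^^ ((a ^^^ b) >>> 5)
      = (a ^^^ (a >>> 5)) ^^^ (b ^^^ (b >>> 5)) := by
  rw [Nat.shiftRight_xor_distrib, pvXor4]

lemma pvStage3Lin (a b : Nat) :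
    ((a ^^^ b) ^^^ ((a ^^^ b) <<< 11)) &&& 16777215
      = ((a ^^^ (a <<< 11)) &&& 16777215) ^^^ ((b ^^^ (b <<< 11)) &&& 16777215) := by
  rw [Nat.shiftLeft_xor_distrib, pvXor4, Nat.and_xor_distrib_right]

lemma pvStepB_linear (a b : Nat) : pvStepB (a ^^^ b) = pvStepB a ^^^ pvStepB b := by
  simp only [pvStepB]
  rw [pvStage1Lin, pvStage2Lin, pvStage3Lin]

lemma pvColsApply (x : Nat) (hx : x < 16777216) : pvApply pvBase x = pvStepB x := by
  unfold pvBase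
  exact pvApply_cols 24 pvStepB rfl pvStepB_linear x (lt_of_lt_of_le hx (by norm_num))

lemma pvIterAgree : ∀ (k m : Nat), m < 16777216 →
    (fun y => pvApply pvBase y)^[k] m = pvStepB^[k] m := by
  intro k
  induction k with
  | zero => intro m _; rfl
  | succ k ih =>
    intro m hm
    rw [Function.iterate_succ_apply, Function.iterate_succ_apply,
        pvColsApply m hm, ih (pvStepB m) (pvStepB_lt m)]

-- ===== VERDICT (by name: the statement is the Claim_ definition above) =====
theorem gen_sec_spec : Claim_equal_gen_sec := by
  intro cur_sec iterations _
  unfold Spec_gen_sec gen_sec gen_sec_alt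
  by_cases h : iterations ≤ 0
  · rw [PySem.List.pyRange_one_eq_nil h, if_pos h]
    rfl
  · rw [if_neg h]
    rw [pvFoldConst, PySem.List.length_pyRange_one]
    obtain ⟨k, hk⟩ : ∃ k, (iterations - 0).toNat = k + 1 :=
      ⟨(iterations - 0).toNat - 1, by omega⟩
    have hit : iterations.toNat = k + 1 := by omega
    rw [hk, pvLiftIter k cur_sec, hit]
    have hm : (PySem.Int.mod cur_sec 16777216).toNat = pvNr cur_sec := by
      rw [PySem.Int.mod_eq_emod_of_pos (by norm_num)]; rfl
    rw [hm, pvPow_apply, pvIdentApply _ (pvNr_lt cur_sec),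
        pvIterAgree (k + 1) (pvNr cur_sec) (pvNr_lt cur_sec)]
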